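-- pv_equiv track=rewrite | github.com/Ace1928/eidosian_forge | archive_forge/src/archive_forge/func__common_stride.py | _common_stride
-- ===== SOURCE A (Python) =====
-- def _common_stride(offsets, counts, itemsize):
--     """
--     Returns the stride between the fields, or None if the stride is not
--     constant. The values in "counts" designate the lengths of
--     subarrays. Subarrays are treated as many contiguous fields, with
--     always positive stride.
--     """
--     if len(offsets) <= 1:
--         return itemsize
--     negative = offsets[1] < offsets[0]
--     if negative:
--         it = zip(reversed(offsets), reversed(counts))
--     else:
--         it = zip(offsets, counts)
--     prev_offset = None
--     stride = None
--     for offset, count in it: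
--         if count != 1:
--             if negative:
--                 return None
--             if stride is None:
--                 stride = itemsize
--             if stride != itemsize:
--                 return None
--             end_offset = offset + (count - 1) * itemsize
--         else:
--             end_offset = offset
--         if prev_offset is not None:
--             new_stride = offset - prev_offset
--             if stride is None:
--                 stride = new_stride
--             if stride != new_stride:
--                 return None
--         prev_offset = end_offset
--     if negative:
--         return -stride
--     return stride
-- ===== SOURCE B (Python) =====
-- def _common_stride(offsets, counts, itemsize):
--     if len(offsets) <= 1:
--         return itemsize
--     negative = offsets[1] < offsets[0]
--     if negative:
--         offsets = offsets[::-1]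
--         counts = counts[::-1]
--     pairs = list(zip(offsets, counts))
--     # pass 1: validate subarray counts, pin the stride, record field end offsets
--     stride = None
--     ends = []
--     for offset, count in pairs:
--         if count == 1:
--             ends.append(offset)
--         elif negative:
--             return None
--         else:
--             stride = itemsize
--             ends.append(offset + (count - 1) * itemsize)
--     # pass 2: every gap between a field start and the previous field end must agree
--     for (start, _), prev_end in zip(pairs[1:], ends):
--         gap = start - prev_end
--         if stride is None:
--             stride = gap
--         elif gap != stride:
--             return None
--     if stride is None:
--         return None
--     return -stride if negative else stride
-- ===== Notes on version B (the rewrite author's own statement) =====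
-- stated objective: alternative
-- what changed: B replaces A's single fused loop with threaded prev_offset/stride state by two separate passes over the direction-adjusted pairs: one pass validates subarray counts, pins the stride and records field end offsets, a second pass checks all consecutive start/end gaps against the (possibly pinned) stride.
import Mathlib
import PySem

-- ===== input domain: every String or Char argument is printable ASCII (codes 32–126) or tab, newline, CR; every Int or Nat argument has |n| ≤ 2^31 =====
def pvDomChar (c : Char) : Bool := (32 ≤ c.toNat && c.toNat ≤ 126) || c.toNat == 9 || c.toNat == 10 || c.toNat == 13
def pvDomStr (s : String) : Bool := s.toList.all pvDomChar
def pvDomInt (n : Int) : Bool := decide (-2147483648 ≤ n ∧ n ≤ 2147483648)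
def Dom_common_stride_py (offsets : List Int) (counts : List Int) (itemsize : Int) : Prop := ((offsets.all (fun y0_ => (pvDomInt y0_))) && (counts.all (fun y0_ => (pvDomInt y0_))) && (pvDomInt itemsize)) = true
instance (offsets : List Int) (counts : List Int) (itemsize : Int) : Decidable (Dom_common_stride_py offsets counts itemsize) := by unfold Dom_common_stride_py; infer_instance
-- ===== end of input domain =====

-- B recomputes the result in two separate passes (subarray validation/stride pinning + end offsets,
-- then consecutive gap checks) instead of A's single fused loop; objective: alternative decomposition,
-- same asymptotic cost. Equivalence of the RETURN value is what is proved.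

-- ===== PORT A =====
-- join of the two branches of A's loop body: the "prev_offset is not None" check + state update
def finA (prevOffset : Option Int) (offset endOffset : Int) (stride : Option Int) :
    Option (Option Int × Option Int) :=
  match prevOffset with
  | none => some (some endOffset, stride)
  | some p =>
    let newStride := offset - p
    let stride1 := match stride with | none => some newStride | some s => some s
    if stride1 ≠ some newStride then none else some (some endOffset, stride1)

-- one iteration of A's for-loop; `none` = the Python `return None` early exits
def stepA (neg : Bool) (it : Int) (st : Option Int × Option Int) (oc : Int × Int) :
    Option (Option Int × Option Int) :=
  if oc.2 ≠ 1 then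
    if neg then none
    else
      let stride1 := match st.2 with | none => some it | some s => some s
      if stride1 ≠ some it then none
      else finA st.1 oc.1 (oc.1 + (oc.2 - 1) * it) stride1
  else finA st.1 oc.1 oc.1 st.2

-- A's for-loop over the (possibly reversed) zipped pairs, state = (prev_offset, stride);
-- at the end, `return -stride` with stride = None raises TypeError in Python (excluded by Pre_): ported as none
def loopA (neg : Bool) (it : Int) : List (Int × Int) → Option Int × Option Int → Option Int
  | [], st => if neg then (match st.2 with | some s => some (-s) | none => none) else st.2
  | oc :: rest, st =>
    match stepA neg it st oc with
    | none => none
    | some st' => loopA neg it rest st'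

def common_stride_py (offsets : List Int) (counts : List Int) (itemsize : Int) : Option Int :=
  if offsets.length ≤ 1 then some itemsize
  else
    match offsets with
    | o0 :: o1 :: _ =>
      let negative := decide (o1 < o0)
      let pairs := if negative then offsets.reverse.zip counts.reverse else offsets.zip counts
      loopA negative itemsize pairs (none, none)
    | _ => some itemsize   -- unreachable: offsets has ≥ 2 elements here

-- ===== PORT B =====
-- pass 1 of Source B: validate counts, pin the stride, collect the field end offsets
def pass1B (neg : Bool) (it : Int) :
    List (Int × Int) → Option Int → List Int → Option (Option Int × List Int)
  | [], stride, ends => some (stride, ends)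
  | (o, c) :: rest, stride, ends =>
    if c = 1 then pass1B neg it rest stride (ends ++ [o])
    else if neg then none
    else pass1B neg it rest (some it) (ends ++ [o + (c - 1) * it])

-- pass 2 of Source B: every gap between a field start and the previous field end must agree
def pass2B : List (Int × Int) → List Int → Option Int → Option (Option Int)
  | [], _, stride => some stride
  | _ :: _, [], stride => some stride
  | (start, _) :: rest, prevEnd :: ends, stride =>
    let gap := start - prevEnd
    match stride with
    | none => pass2B rest ends (some gap)
    | some s => if gap ≠ s then none else pass2B rest ends (some s)

def common_stride_py_alt (offsets : List Int) (counts : List Int) (itemsize : Int) : Option Int :=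
  if offsets.length ≤ 1 then some itemsize
  else
    let negative := decide (offsets.getD 1 0 < offsets.getD 0 0)
    let offs := if negative then offsets.reverse else offsets
    let cnts := if negative then counts.reverse else counts
    let pairs := offs.zip cnts
    match pass1B negative itemsize pairs none [] with
    | none => none
    | some (stride, ends) =>
      match pass2B (pairs.drop 1) ends stride with
      | none => none
      | some none => none
      | some (some s) => if negative then some (-s) else some s

-- ===== PRECONDITION & SPEC =====
-- Pre_ excludes exactly the inputs on which Python A raises TypeError (`-stride` with stride still None):
-- a descending pair of first offsets with at most one zipped (offset, count) item whose count is 1.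
def Pre_common_stride_py (offsets : List Int) (counts : List Int) (itemsize : Int) : Prop :=
  ¬ (2 ≤ offsets.length ∧ offsets.getD 1 0 < offsets.getD 0 0 ∧
      counts.length ≤ 1 ∧ ∀ c ∈ counts, c = 1)
instance (offsets : List Int) (counts : List Int) (itemsize : Int) :
    Decidable (Pre_common_stride_py offsets counts itemsize) := by
  unfold Pre_common_stride_py; infer_instance

def pvWitness_common_stride_py : List Int × List Int × Int := ([0, 4, 8], [1, 1, 1], 4)

def Spec_common_stride_py (offsets : List Int) (counts : List Int) (itemsize : Int) (out : Option Int) : Prop := out = common_stride_py_alt offsets counts itemsize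
instance (offsets : List Int) (counts : List Int) (itemsize : Int) (out : Option Int) : Decidable (Spec_common_stride_py offsets counts itemsize out) := by unfold Spec_common_stride_py; infer_instance

-- ===== CLAIM (what is proved, stated in full; the proofs are below) =====
def Claim_equal_common_stride_py : Prop := ∀ (offsets : List Int) (counts : List Int) (itemsize : Int), Dom_common_stride_py offsets counts itemsize → Pre_common_stride_py offsets counts itemsize → Spec_common_stride_py offsets counts itemsize (common_stride_py offsets counts itemsize)


-- ===== LEMMAS AND PROOFS =====

-- end offset of a field: o itself, or the end of the subarray
def endOff (it o c : Int) : Int := if c = 1 then o else o + (c - 1) * it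

-- abstract "event" machine: each event is a required stride value (none = hard failure);
-- threads the stride exactly like both programs do
def evalEv : List (Option Int) → Option Int → Option (Option Int)
  | [], s => some s
  | none :: _, _ => none
  | some v :: rest, none => evalEv rest (some v)
  | some v :: rest, some s => if v ≠ s then none else evalEv rest (some s)

def finishEv (neg : Bool) : Option (Option Int) → Option Int
  | none => none
  | some none => none
  | some (some s) => if neg then some (-s) else some s

-- events in A's interleaved order
def evA (neg : Bool) (it : Int) : Option Int → List (Int × Int) → List (Option Int)
  | _, [] => []
  | p?, (o, c) :: rest =>
    (if c ≠ 1 then [if neg then none else some it] else []) ++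
      (match p? with | none => [] | some p => [some (o - p)]) ++
      evA neg it (some (endOff it o c)) rest

-- the subarray events alone, and the gap events alone (B's order)
def bigsEv (neg : Bool) (it : Int) (pairs : List (Int × Int)) : List (Option Int) :=
  pairs.flatMap (fun oc => if oc.2 ≠ 1 then [if neg then none else some it] else [])

def dEv (it : Int) : Option Int → List (Int × Int) → List (Option Int)
  | _, [] => []
  | none, (o, c) :: rest => dEv it (some (endOff it o c)) rest
  | some p, (o, c) :: rest => some (o - p) :: dEv it (some (endOff it o c)) rest

-- order-free characterisation of evalEv
def canonEv (l : List (Option Int)) (s : Option Int) : Option (Option Int) :=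
  if none ∈ l then none
  else
    match s, l.filterMap id with
    | none, [] => some none
    | none, v :: r => if (v :: r).all (· = v) then some (some v) else none
    | some s, vs => if vs.all (· = s) then some (some s) else none

theorem loopA_eq_evalEv (neg : Bool) (it : Int) :
    ∀ (pairs : List (Int × Int)) (p? s : Option Int),
      loopA neg it pairs (p?, s) = finishEv neg (evalEv (evA neg it p? pairs) s) := by
  intro pairs
  induction pairs with
  | nil =>
    intro p? s
    cases s <;> cases neg <;> simp [loopA, evA, evalEv, finishEv]
  | cons hd tl ih =>
    intro p? s
    obtain ⟨o, c⟩ := hd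
    by_cases hc : c = 1
    · subst hc
      cases p? with
      | none => simpa [loopA, stepA, finA, evA, evalEv, endOff] using ih (some o) s
      | some p =>
        cases s with
        | none => simpa [loopA, stepA, finA, evA, evalEv, endOff] using ih (some o) (some (o - p))
        | some s =>
          by_cases hg : o - p = s
          · simpa [loopA, stepA, finA, evA, evalEv, endOff, hg] using ih (some o) (some s)
          · simp [loopA, stepA, finA, evA, evalEv, endOff, hg, Ne.symm hg, finishEv]
    · cases neg with
      | true => cases p? <;> simp [loopA, stepA, evA, evalEv, finishEv, hc]
      | false =>
        have hend : endOff it o c = o + (c - 1) * it := by simp [endOff, hc]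
        cases s with
        | none =>
          cases p? with
          | none =>
            simpa [loopA, stepA, finA, evA, evalEv, hc, hend] using
              ih (some (o + (c - 1) * it)) (some it)
          | some p =>
            by_cases hg : o - p = it
            · simpa [loopA, stepA, finA, evA, evalEv, hc, hend, hg] using
                ih (some (o + (c - 1) * it)) (some it)
            · simp [loopA, stepA, finA, evA, evalEv, hc, hend, hg, Ne.symm hg, finishEv]
        | some s =>
          by_cases hs : s = it
          · subst hs
            cases p? with
            | none =>
              simpa [loopA, stepA, finA, evA, evalEv, hc, hend] using
                ih (some (o + (c - 1) * s)) (some s)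
            | some p =>
              by_cases hg : o - p = s
              · simpa [loopA, stepA, finA, evA, evalEv, hc, hend, hg] using
                  ih (some (o + (c - 1) * s)) (some s)
              · simp [loopA, stepA, finA, evA, evalEv, hc, hend, hg, Ne.symm hg, finishEv]
          · cases p? <;>
              simp [loopA, stepA, evA, evalEv, hc, hend, hs, Ne.symm hs, finishEv]

theorem evalEv_append : ∀ (l1 l2 : List (Option Int)) (s : Option Int),
    evalEv (l1 ++ l2) s =
      (match evalEv l1 s with | none => none | some s' => evalEv l2 s') := by
  intro l1
  induction l1 with
  | nil => intro l2 s; rfl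
  | cons h tl ih =>
    intro l2 s
    cases h with
    | none => rfl
    | some v =>
      cases s with
      | none => simpa [evalEv] using ih l2 (some v)
      | some s =>
        by_cases hv : v = s <;> simp [evalEv, hv, ih]

theorem evalEv_eq_canonEv : ∀ (l : List (Option Int)) (s : Option Int),
    evalEv l s = canonEv l s := by
  intro l
  induction l with
  | nil => intro s; cases s <;> rfl
  | cons h tl ih =>
    intro s
    cases h with
    | none => cases s <;> simp [evalEv, canonEv]
    | some v =>
      cases s with
      | none =>
        rw [evalEv, ih (some v)]
        simp only [canonEv, List.mem_cons, List.filterMap_cons, Option.some.injEq]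
        by_cases hm : (none : Option Int) ∈ tl
        · simp [hm]
        · simp only [hm, if_false, reduceCtorEq, false_or, id]
          simp [List.all_eq_true]
      | some s =>
        by_cases hv : v = s
        · subst hv
          rw [evalEv, if_neg (by simp), ih (some v)]
          simp only [canonEv, List.mem_cons, List.filterMap_cons, reduceCtorEq, false_or, id]
          by_cases hm : (none : Option Int) ∈ tl
          · simp [hm]
          · simp [hm, List.all_eq_true]
        · rw [evalEv, if_pos (by simpa using hv)]
          simp only [canonEv, List.mem_cons, List.filterMap_cons, reduceCtorEq, false_or, id]
          by_cases hm : (none : Option Int) ∈ tl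
          · simp [hm]
          · simp [hm, Ne.symm hv, hv]

theorem canonEv_perm {l l' : List (Option Int)} (h : l.Perm l') (s : Option Int) :
    canonEv l s = canonEv l' s := by
  unfold canonEv
  have hmem : ((none : Option Int) ∈ l) ↔ (none ∈ l') := h.mem_iff
  by_cases hn : (none : Option Int) ∈ l
  · simp [hn, hmem.mp hn]
  · have hn' : (none : Option Int) ∉ l' := fun x => hn (hmem.mpr x)
    simp only [hn, hn', if_false]
    have hp : (l.filterMap id).Perm (l'.filterMap id) := h.filterMap id
    cases s with
    | some s =>
      have hallEq : (∀ x ∈ l.filterMap id, x = s) ↔ (∀ x ∈ l'.filterMap id, x = s) :=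
        ⟨fun hA x hx => hA x (hp.mem_iff.mpr hx), fun hA x hx => hA x (hp.mem_iff.mp hx)⟩
      cases hvs : l.filterMap id with
      | nil =>
        have h0 : l'.filterMap id = [] := by
          have h1 := hp; rw [hvs] at h1; exact h1.symm.eq_nil
        rw [h0]
      | cons v r =>
        rw [hvs] at hp hallEq
        cases hvs' : l'.filterMap id with
        | nil =>
          rw [hvs'] at hp
          exact absurd hp.eq_nil (by simp)
        | cons v' r' =>
          rw [hvs'] at hp hallEq
          by_cases hA : ∀ x ∈ v :: r, x = s
          · have hA' := hallEq.mp hA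
            have hb : ((v :: r).all fun x => decide (x = s)) = true := by
              simpa [List.all_eq_true] using hA
            have hb' : ((v' :: r').all fun x => decide (x = s)) = true := by
              simpa [List.all_eq_true] using hA'
            simp only [hb, hb', if_true]
          · have hA' : ¬ ∀ x ∈ v' :: r', x = s := fun hB => hA (hallEq.mpr hB)
            have hb : ((v :: r).all fun x => decide (x = s)) = false := by
              rw [List.all_eq_false]
              push_neg at hA
              obtain ⟨x, hx, hxs⟩ := hA
              exact ⟨x, hx, by simpa using hxs⟩
            have hb' : ((v' :: r').all fun x => decide (x = s)) = false := by
              rw [List.all_eq_false]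
              push_neg at hA'
              obtain ⟨x, hx, hxs⟩ := hA'
              exact ⟨x, hx, by simpa using hxs⟩
            simp only [hb, hb', Bool.false_eq_true, if_false]
    | none =>
      cases hvs : l.filterMap id with
      | nil =>
        have h0 : l'.filterMap id = [] := by
          have h1 := hp; rw [hvs] at h1; exact h1.symm.eq_nil
        rw [h0]
      | cons v r =>
        rw [hvs] at hp
        cases hvs' : l'.filterMap id with
        | nil =>
          rw [hvs'] at hp
          exact absurd hp.eq_nil (by simp)
        | cons v' r' =>
          rw [hvs'] at hp
          by_cases hA : ∀ x ∈ v :: r, x = v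
          · have hv' : v' = v := hA v' (hp.mem_iff.mpr (List.mem_cons_self ..))
            have hA' : ∀ x ∈ v' :: r', x = v' := fun x hx =>
              (hA x (hp.mem_iff.mpr hx)).trans hv'.symm
            have hb : ((v :: r).all fun x => decide (x = v)) = true := by
              simpa [List.all_eq_true] using hA
            have hb' : ((v' :: r').all fun x => decide (x = v')) = true := by
              simpa [List.all_eq_true] using hA'
            simp only [hb, hb', if_true]
            rw [hv']
          · have hA' : ¬ ∀ x ∈ v' :: r', x = v' := by
              intro hB
              have hv : v = v' := hB v (hp.mem_iff.mp (List.mem_cons_self ..))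
              exact hA fun x hx => (hB x (hp.mem_iff.mp hx)).trans hv.symm
            have hb : ((v :: r).all fun x => decide (x = v)) = false := by
              rw [List.all_eq_false]
              push_neg at hA
              obtain ⟨x, hx, hxs⟩ := hA
              exact ⟨x, hx, by simpa using hxs⟩
            have hb' : ((v' :: r').all fun x => decide (x = v')) = false := by
              rw [List.all_eq_false]
              push_neg at hA'
              obtain ⟨x, hx, hxs⟩ := hA'
              exact ⟨x, hx, by simpa using hxs⟩
            simp only [hb, hb', Bool.false_eq_true, if_false]

theorem evA_perm (neg : Bool) (it : Int) :
    ∀ (pairs : List (Int × Int)) (p? : Option Int),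
      (evA neg it p? pairs).Perm (bigsEv neg it pairs ++ dEv it p? pairs) := by
  intro pairs
  induction pairs with
  | nil => intro p?; cases p? <;> simp [evA, bigsEv, dEv]
  | cons hd tl ih =>
    intro p?
    obtain ⟨o, c⟩ := hd
    have key : ∀ D0 : List (Option Int),
        ((if c ≠ 1 then [if neg then none else some it] else []) ++
            (D0 ++ evA neg it (some (endOff it o c)) tl)).Perm
          (((if c ≠ 1 then [if neg then none else some it] else []) ++ bigsEv neg it tl) ++
            (D0 ++ dEv it (some (endOff it o c)) tl)) := by
      intro D0
      have h1 := (List.Perm.append_left D0 (ih (some (endOff it o c))))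
      have h2 : (D0 ++ (bigsEv neg it tl ++ dEv it (some (endOff it o c)) tl)).Perm
          (bigsEv neg it tl ++ (D0 ++ dEv it (some (endOff it o c)) tl)) := by
        rw [← List.append_assoc, ← List.append_assoc]
        exact List.Perm.append_right _ List.perm_append_comm
      have h3 := (h1.trans h2)
      have h4 := List.Perm.append_left (if c ≠ 1 then [if neg then none else some it] else []) h3
      simpa [List.append_assoc] using h4
    cases p? with
    | none => simpa [evA, bigsEv, dEv, List.flatMap_cons] using key []
    | some p => simpa [evA, bigsEv, dEv, List.flatMap_cons] using key [some (o - p)]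

theorem pass1B_spec (neg : Bool) (it : Int) :
    ∀ (pairs : List (Int × Int)) (s : Option Int) (acc : List Int),
      pass1B neg it pairs s acc =
        if neg = true ∧ (∃ oc ∈ pairs, oc.2 ≠ 1) then none
        else some ((if ∃ oc ∈ pairs, oc.2 ≠ 1 then some it else s),
                   acc ++ pairs.map (fun oc => endOff it oc.1 oc.2)) := by
  intro pairs
  induction pairs with
  | nil => intro s acc; simp [pass1B]
  | cons hd tl ih =>
    intro s acc
    obtain ⟨o, c⟩ := hd
    by_cases hc : c = 1
    · subst hc
      rw [pass1B, if_pos rfl, ih]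
      by_cases hb : ∃ oc ∈ tl, oc.2 ≠ 1
      · have : (∃ oc ∈ (((o : Int), (1 : Int)) :: tl), oc.2 ≠ 1) := by
          obtain ⟨oc, hm, ho⟩ := hb; exact ⟨oc, List.mem_cons_of_mem _ hm, ho⟩
        simp [hb, this, endOff]
      · have : (∃ oc ∈ (((o : Int), (1 : Int)) :: tl), oc.2 ≠ 1) ↔ False := by
          simp only [iff_false]
          rintro ⟨oc, hm, ho⟩
          rcases List.mem_cons.mp hm with h | h
          · subst h; exact ho rfl
          · exact hb ⟨oc, h, ho⟩
        simp [hb, this, endOff]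
    · have hex : ∃ oc ∈ (((o : Int), c) :: tl), oc.2 ≠ 1 := ⟨(o, c), List.mem_cons_self .., hc⟩
      rw [pass1B, if_neg hc]
      cases neg with
      | true => simp [hc]
      | false => simp [ih, hex, endOff, hc]

theorem evalEv_bigsEv (neg : Bool) (it : Int) (pairs : List (Int × Int)) :
    evalEv (bigsEv neg it pairs) none =
      if neg = true ∧ (∃ oc ∈ pairs, oc.2 ≠ 1) then none
      else some (if ∃ oc ∈ pairs, oc.2 ≠ 1 then some it else none) := by
  have aux : ∀ pairs : List (Int × Int), evalEv (bigsEv neg it pairs) (some it) =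
      if neg = true ∧ (∃ oc ∈ pairs, oc.2 ≠ 1) then none else some (some it) := by
    intro pairs
    induction pairs with
    | nil => simp [bigsEv, evalEv]
    | cons hd tl ih =>
      obtain ⟨o, c⟩ := hd
      by_cases hc : c = 1
      · subst hc
        simp only [bigsEv, List.flatMap_cons] at ih ⊢
        have hiff : (neg = true ∧ ∃ oc ∈ ((o, (1:Int)) :: tl), oc.2 ≠ 1) ↔
            (neg = true ∧ ∃ oc ∈ tl, oc.2 ≠ 1) := by simp
        rw [if_congr hiff rfl rfl]
        simpa using ih
      · cases neg with
        | true => simp [bigsEv, List.flatMap_cons, hc, evalEv]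
        | false =>
          simp only [bigsEv, List.flatMap_cons] at ih ⊢
          simpa [hc, evalEv] using ih
  induction pairs with
  | nil => simp [bigsEv, evalEv]
  | cons hd tl ih =>
    obtain ⟨o, c⟩ := hd
    by_cases hc : c = 1
    · subst hc
      simp only [bigsEv, List.flatMap_cons] at ih ⊢
      have hiff2 : (∃ oc ∈ ((o, (1:Int)) :: tl), oc.2 ≠ 1) ↔ (∃ oc ∈ tl, oc.2 ≠ 1) := by simp
      have hiff1 : (neg = true ∧ ∃ oc ∈ ((o, (1:Int)) :: tl), oc.2 ≠ 1) ↔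
          (neg = true ∧ ∃ oc ∈ tl, oc.2 ≠ 1) := by simp
      rw [if_congr hiff1 rfl rfl, if_congr hiff2 rfl rfl]
      simpa using ih
    · cases neg with
      | true => simp [bigsEv, List.flatMap_cons, hc, evalEv]
      | false =>
        simp only [bigsEv, List.flatMap_cons]
        have hex : ∃ oc ∈ ((o, c) :: tl), oc.2 ≠ 1 := ⟨(o, c), List.mem_cons_self .., hc⟩
        rw [if_neg (by simp : ¬((false = true) ∧ ∃ oc ∈ ((o, c) :: tl), oc.2 ≠ 1)),
          if_pos hex]
        simpa [bigsEv, hc, evalEv] using aux tl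

theorem pass2B_eq_evalEv : ∀ (l1 : List (Int × Int)) (l2 : List Int) (s : Option Int),
    pass2B l1 l2 s = evalEv ((l1.zip l2).map (fun x => some (x.1.1 - x.2))) s := by
  intro l1
  induction l1 with
  | nil => intro l2 s; rfl
  | cons hd tl ih =>
    intro l2 s
    obtain ⟨start, c⟩ := hd
    cases l2 with
    | nil => rfl
    | cons e es =>
      cases s with
      | none => simp [pass2B, evalEv, ih]
      | some s =>
        by_cases hg : start - e = s <;> simp [pass2B, evalEv, hg, ih]

theorem zip_ends_eq_dEv (it : Int) :
    ∀ (pairs : List (Int × Int)),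
      ((pairs.drop 1).zip (pairs.map (fun oc => endOff it oc.1 oc.2))).map
          (fun x => some (x.1.1 - x.2)) = dEv it none pairs := by
  have aux : ∀ (rest : List (Int × Int)) (e : Int),
      (rest.zip (e :: rest.map (fun oc => endOff it oc.1 oc.2))).map
        (fun x => some (x.1.1 - x.2)) = dEv it (some e) rest := by
    intro rest
    induction rest with
    | nil => intro e; rfl
    | cons hd tl ih =>
      intro e
      obtain ⟨o, c⟩ := hd
      simp [dEv, ih]
  intro pairs
  cases pairs with
  | nil => rfl
  | cons hd tl =>
    obtain ⟨o, c⟩ := hd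
    simpa [dEv] using aux tl (endOff it o c)

theorem core_agree (neg : Bool) (it : Int) (pairs : List (Int × Int)) :
    loopA neg it pairs (none, none) =
      (match pass1B neg it pairs none [] with
       | none => none
       | some (stride, ends) =>
         match pass2B (pairs.drop 1) ends stride with
         | none => none
         | some none => none
         | some (some s) => if neg then some (-s) else some s) := by
  rw [loopA_eq_evalEv, evalEv_eq_canonEv,
    canonEv_perm (evA_perm neg it pairs none) none, ← evalEv_eq_canonEv,
    evalEv_append, evalEv_bigsEv, pass1B_spec]
  by_cases hbig : ∃ oc ∈ pairs, oc.2 ≠ 1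
  · cases neg with
    | true => simp [hbig, finishEv]
    | false =>
      simp only [hbig, if_true, Bool.false_eq_true, false_and, if_false, List.nil_append]
      rw [pass2B_eq_evalEv, zip_ends_eq_dEv]
      cases hE : evalEv (dEv it none pairs) (some it) with
      | none => simp [finishEv]
      | some v => cases v <;> simp [finishEv]
  · simp only [hbig, if_false, and_false, List.nil_append]
    rw [pass2B_eq_evalEv, zip_ends_eq_dEv]
    cases hE : evalEv (dEv it none pairs) none with
    | none => simp [finishEv]
    | some v => cases v <;> simp [finishEv]

theorem ports_agree (offsets counts : List Int) (itemsize : Int) :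
    common_stride_py offsets counts itemsize = common_stride_py_alt offsets counts itemsize := by
  unfold common_stride_py common_stride_py_alt
  by_cases hlen : offsets.length ≤ 1
  · simp [hlen]
  · cases offsets with
    | nil => simp at hlen
    | cons o0 t =>
      cases t with
      | nil => simp at hlen
      | cons o1 rest =>
        rw [if_neg hlen, if_neg hlen]
        simp only [List.getD_cons_succ, List.getD_cons_zero]
        by_cases hneg : o1 < o0
        · simp only [hneg, decide_true, if_true]
          exact core_agree true itemsize _
        · simp only [hneg, decide_false, Bool.false_eq_true, if_false]
          exact core_agree false itemsize _

-- ===== VERDICT (by name: the statement is the Claim_ definition above) =====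
theorem common_stride_py_spec : Claim_equal_common_stride_py := by
  intro offsets counts itemsize _ _
  unfold Spec_common_stride_py
  exact ports_agree offsets counts itemsize
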